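-- pv_equiv track=rewrite | github.com/biroa/edx_python | middle_exam/pattern_sum.py | pattern_sum
-- ===== SOURCE A (Python) =====
-- def pattern_sum(a, b):
--     length = b+1
--     result=[]
--     for i in range(1,length):
--         if(i==1):
--             result.append(a)
--         else:
--             item = ''
--             for j in range(1,i+1):
--                 item = item + str(a)
--             result.append(int(item))
--
--     return sum(result)
-- ===== SOURCE B (Python) =====
-- def pattern_sum(a, b):
--     s = ''
--     total = 0
--     for i in range(1, b + 1):
--         s += str(a)
--         total += a if i == 1 else int(s)
--     return total
-- ===== Notes on version B (the rewrite author's own statement) =====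
-- stated objective: simpler
-- what changed: Replaces the nested term-rebuilding loop (each term's digit string rebuilt from scratch, collected in a list and summed at the end) with a single pass that maintains one incrementally growing string and a running total.
import Mathlib
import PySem

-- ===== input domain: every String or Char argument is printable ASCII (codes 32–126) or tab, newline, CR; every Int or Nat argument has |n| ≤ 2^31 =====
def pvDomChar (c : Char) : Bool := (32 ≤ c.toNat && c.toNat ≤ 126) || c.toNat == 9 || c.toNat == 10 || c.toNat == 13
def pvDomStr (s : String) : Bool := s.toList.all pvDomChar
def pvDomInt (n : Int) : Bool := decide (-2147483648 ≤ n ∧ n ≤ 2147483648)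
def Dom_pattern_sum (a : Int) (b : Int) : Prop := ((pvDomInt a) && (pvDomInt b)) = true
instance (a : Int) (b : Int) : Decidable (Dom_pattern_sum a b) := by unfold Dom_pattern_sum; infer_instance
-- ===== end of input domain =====

-- B keeps one running digit string and a running total in a single pass instead of
-- rebuilding each term's string from scratch and summing a collected list (simpler, one loop).

-- ===== PORT A =====
def pattern_sum (a : Int) (b : Int) : Int :=
  let length := b + 1
  let result : List Int :=
    (PySem.List.pyRange 1 length 1).foldl (fun result i =>
      if i = 1 then result ++ [a]
      else
        let item : List Char :=
          (PySem.List.pyRange 1 (i + 1) 1).foldl (fun item _ => item ++ PySem.Int.toChars a) []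
        result ++ [(PySem.Int.ofChars? item).getD 0]) []
  result.sum

-- ===== PORT B =====
def pattern_sum_alt (a : Int) (b : Int) : Int :=
  let st :=
    (PySem.List.pyRange 1 (b + 1) 1).foldl (fun (st : List Char × Int) i =>
      let s := st.1 ++ PySem.Int.toChars a
      (s, st.2 + (if i = 1 then a else (PySem.Int.ofChars? s).getD 0))) (([] : List Char), 0)
  st.2

-- ===== PRECONDITION & SPEC =====
-- Pre_ excludes a < 0 with b ≥ 2: there Python A (and B) raise ValueError from int() on a
-- string like '-5-5'.
def Pre_pattern_sum (a : Int) (b : Int) : Prop := 0 ≤ a ∨ b ≤ 1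
instance (a : Int) (b : Int) : Decidable (Pre_pattern_sum a b) := by unfold Pre_pattern_sum; infer_instance
def pvWitness_pattern_sum : Int × Int := (7, 4)
def Spec_pattern_sum (a : Int) (b : Int) (out : Int) : Prop := out = pattern_sum_alt a b
instance (a : Int) (b : Int) (out : Int) : Decidable (Spec_pattern_sum a b out) := by unfold Spec_pattern_sum; infer_instance

-- ===== CLAIM (what is proved, stated in full; the proofs are below) =====
def Claim_equal_pattern_sum : Prop := ∀ (a : Int) (b : Int), Dom_pattern_sum a b → Pre_pattern_sum a b → Spec_pattern_sum a b (pattern_sum a b)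

-- ===== LEMMAS AND PROOFS =====

-- the loop body of A's outer fold / B's fold, and the repeated digit string
def pvAstep (a : Int) : List Int → Int → List Int := fun result i =>
  if i = 1 then result ++ [a]
  else
    let item : List Char :=
      (PySem.List.pyRange 1 (i + 1) 1).foldl (fun item _ => item ++ PySem.Int.toChars a) []
    result ++ [(PySem.Int.ofChars? item).getD 0]

def pvBstep (a : Int) : List Char × Int → Int → List Char × Int := fun st i =>
  let s := st.1 ++ PySem.Int.toChars a
  (s, st.2 + (if i = 1 then a else (PySem.Int.ofChars? s).getD 0))

def pvRep (n : Nat) (c : List Char) : List Char := (List.replicate n c).flatten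

theorem pvRep_succ (n : Nat) (c : List Char) : pvRep (n + 1) c = pvRep n c ++ c := by
  simp [pvRep, List.replicate_succ' (n := n)]

theorem pvRep_succ' (n : Nat) (c : List Char) : pvRep (n + 1) c = c ++ pvRep n c := by
  simp [pvRep, List.replicate_succ]

-- a fold that ignores its element just appends once per element
theorem pvFoldl_const_append (L : List Int) (init c : List Char) :
    L.foldl (fun item (_ : Int) => item ++ c) init = init ++ pvRep L.length c := by
  induction L generalizing init with
  | nil => simp [pvRep]
  | cons x xs ih =>
      simp only [List.foldl_cons, ih, List.length_cons]
      rw [pvRep_succ']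
      simp

-- A's inner loop builds exactly i copies of str(a)
theorem pvInner_eq (a i : Int) :
    (PySem.List.pyRange 1 (i + 1) 1).foldl (fun item (_ : Int) => item ++ PySem.Int.toChars a) []
      = pvRep i.toNat (PySem.Int.toChars a) := by
  rw [pvFoldl_const_append]
  simp [PySem.List.length_pyRange_one]

-- the main invariant, by induction on the number of iterations
theorem pvMain (a : Int) (n : Nat) :
    (PySem.List.pyRange 1 ((n : Int) + 1) 1).foldl (pvBstep a) (([] : List Char), 0)
      = (pvRep n (PySem.Int.toChars a),
         ((PySem.List.pyRange 1 ((n : Int) + 1) 1).foldl (pvAstep a) []).sum) := by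
  induction n with
  | zero => simp [PySem.List.pyRange_one_eq_nil, pvRep]
  | succ n ih =>
      have hsplit : PySem.List.pyRange 1 (((n : Nat) + 1 : Int) + 1) 1
          = PySem.List.pyRange 1 ((n : Int) + 1) 1 ++ [(n : Int) + 1] := by
        have := PySem.List.pyRange_one_succ_right (a := 1) (b := (n : Int) + 1) (by omega)
        simpa using this
      have hc : (((n + 1 : Nat)) : Int) = (n : Int) + 1 := by push_cast; ring
      rw [hc, hsplit, List.foldl_append, List.foldl_append, ih]
      simp only [pvBstep, pvAstep, List.foldl_cons, List.foldl_nil]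
      rw [pvInner_eq a ((n : Int) + 1)]
      have ht : ((n : Int) + 1).toNat = n + 1 := by omega
      rw [ht, pvRep_succ]
      by_cases h1 : ((n : Int) + 1) = 1 <;> simp [h1, List.sum_append]

theorem pvPorts_eq (a b : Int) : pattern_sum a b = pattern_sum_alt a b := by
  by_cases hb : b ≤ 0
  · have h : PySem.List.pyRange 1 (b + 1) 1 = [] := PySem.List.pyRange_one_eq_nil (by omega)
    simp [pattern_sum, pattern_sum_alt, h]
  · have hbn : b = ((b.toNat : Nat) : Int) := by omega
    have := pvMain a b.toNat
    rw [hbn]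
    simp only [pattern_sum, pattern_sum_alt]
    rw [show (fun (st : List Char × Int) (i : Int) =>
          ((st.1 ++ PySem.Int.toChars a),
           st.2 + (if i = 1 then a else (PySem.Int.ofChars? (st.1 ++ PySem.Int.toChars a)).getD 0))) = pvBstep a from rfl]
    rw [show (fun (result : List Int) (i : Int) =>
          if i = 1 then result ++ [a]
          else
            result ++ [(PySem.Int.ofChars?
              ((PySem.List.pyRange 1 (i + 1) 1).foldl (fun item _ => item ++ PySem.Int.toChars a) [])).getD 0]) = pvAstep a from rfl]
    rw [this]

-- ===== VERDICT (by name: the statement is the Claim_ definition above) =====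
theorem pattern_sum_spec : Claim_equal_pattern_sum := by
  intro a b _ _
  exact pvPorts_eq a b
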